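-- pv_equiv track=rewrite | github.com/chokun17872/Computer-Programming-for-Computer-Engineers | Open files & List manipulation/13.py | solve
-- ===== SOURCE A (Python) =====
-- def gen_target():
--     target = []
--     for word in ["computer", "computers"]:
--         for mark in ["!","?",".",""]:
--             target.append(word+mark)
--     return target
--
-- def solve(data):
--     target = gen_target()
--     count = 0
--     for line in data:
--         for word in line:
--             if word in target:
--                 count += 1
--     return count
-- ===== SOURCE B (Python) =====
-- def gen_target():
--     target = []
--     for word in ["computer", "computers"]:
--         for mark in ["!","?",".",""]:
--             target.append(word+mark)
--     return target
--
-- def solve(data):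
--     counts = {}
--     for line in data:
--         for word in line:
--             counts[word] = counts.get(word, 0) + 1
--     total = 0
--     for t in gen_target():
--         total += counts.get(t, 0)
--     return total
-- ===== Notes on version B (the rewrite author's own statement) =====
-- stated objective: alternative
-- what changed: B tallies all words once into a frequency dictionary and then sums the counts of the 8 fixed targets, instead of testing each word for membership in the target list.
import Mathlib
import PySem

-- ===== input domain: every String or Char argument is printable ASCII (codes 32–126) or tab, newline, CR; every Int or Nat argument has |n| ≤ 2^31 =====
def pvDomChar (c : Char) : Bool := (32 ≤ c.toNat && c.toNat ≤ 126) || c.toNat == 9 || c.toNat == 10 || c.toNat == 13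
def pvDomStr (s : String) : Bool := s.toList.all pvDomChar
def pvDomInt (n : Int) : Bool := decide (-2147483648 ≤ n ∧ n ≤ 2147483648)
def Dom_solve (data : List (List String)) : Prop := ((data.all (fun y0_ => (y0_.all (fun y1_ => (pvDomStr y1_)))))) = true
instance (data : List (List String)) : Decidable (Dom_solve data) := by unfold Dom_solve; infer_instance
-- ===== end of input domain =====

-- B tallies all words once into a frequency dictionary and then sums the counts of
-- the 8 fixed targets, instead of testing each word for membership in the target list.

-- ===== PORT A =====
def gen_target : List String :=
  ["computer", "computers"].foldl (fun target word =>
    ["!", "?", ".", ""].foldl (fun target mark => target ++ [word ++ mark]) target) []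

def solve (data : List (List String)) : Int :=
  let target := gen_target
  data.foldl (fun count line =>
    line.foldl (fun count word =>
      if target.contains word then count + 1 else count) count) 0

-- ===== PORT B =====
def solve_alt (data : List (List String)) : Int :=
  let counts : PySem.Dict String Int :=
    data.foldl (fun counts line =>
      line.foldl (fun counts word => counts.insert word (counts.getD word 0 + 1)) counts)
      PySem.Dict.empty
  gen_target.foldl (fun total t => total + counts.getD t 0) 0

-- ===== PRECONDITION & SPEC =====
def Spec_solve (data : List (List String)) (out : Int) : Prop := out = solve_alt data
instance (data : List (List String)) (out : Int) : Decidable (Spec_solve data out) := by unfold Spec_solve; infer_instance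

-- ===== CLAIM (what is proved, stated in full; the proofs are below) =====
def Claim_equal_solve : Prop := ∀ (data : List (List String)), Dom_solve data → Spec_solve data (solve data)

-- ===== LEMMAS AND PROOFS =====

-- A's inner loop: adds the number of words of the line that lie in T
theorem inner_count (T : List String) :
    ∀ (l : List String) (c : Int),
      l.foldl (fun count word => if T.contains word then count + 1 else count) c
        = c + (l.countP (fun w => T.contains w) : Int) := by
  intro l
  induction l with
  | nil => intro c; simp
  | cons w l ih =>
    intro c
    simp only [List.foldl_cons, List.countP_cons, ih]
    split_ifs with h <;> push_cast <;> ring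

-- A's outer loop over the flattened word list
theorem solve_eq_countP (T : List String) :
    ∀ (data : List (List String)) (c : Int),
      data.foldl (fun count line =>
        line.foldl (fun count word => if T.contains word then count + 1 else count) count) c
        = c + ((data.flatMap id).countP (fun w => T.contains w) : Int) := by
  intro data
  induction data with
  | nil => intro c; simp
  | cons line data ih =>
    intro c
    rw [List.foldl_cons, ih, inner_count]
    simp only [List.flatMap_cons, List.countP_append, id]
    push_cast; ring

-- B's dictionary after the tally loop counts each word of the flattened list
theorem dict_getD (v : String) :
    ∀ (data : List (List String)) (d : PySem.Dict String Int),
      (data.foldl (fun counts line =>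
        line.foldl (fun counts word => counts.insert word (counts.getD word 0 + 1)) counts) d).getD v 0
        = d.getD v 0 + ((data.flatMap id).count v : Int) := by
  intro data
  induction data with
  | nil => intro d; simp
  | cons line data ih =>
    intro d
    simp only [List.foldl_cons, ih, PySem.Dict.getD_foldl_insert_add_one, List.flatMap_cons,
      List.count_append, id]
    push_cast; ring

-- splitting a membership count over a cons'd, fresh head of the target list (in Nat)
theorem countP_contains_cons (t : String) (T : List String) (h : t ∉ T) (xs : List String) :
    xs.countP (fun w => (t :: T).contains w)
      = xs.count t + xs.countP (fun w => T.contains w) := by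
  induction xs with
  | nil => simp
  | cons w xs ih =>
    simp only [List.countP_cons, List.count_cons, List.contains_eq_mem] at ih ⊢
    rw [ih]
    by_cases hw : w = t
    · subst hw; simp [h]; omega
    · simp [hw, Nat.add_assoc]

-- summing the per-target counts equals one membership count, for nodup targets
theorem sum_counts (T : List String) (hT : T.Nodup) (xs : List String) :
    ∀ (a : Int), T.foldl (fun total t => total + (xs.count t : Int)) a
      = a + (xs.countP (fun w => T.contains w) : Int) := by
  induction T with
  | nil => intro a; simp
  | cons t T ih =>
    intro a
    rcases List.nodup_cons.mp hT with ⟨ht, hT'⟩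
    rw [List.foldl_cons, ih hT', countP_contains_cons t T ht xs]
    push_cast; ring

theorem gen_target_nodup : gen_target.Nodup := by decide

-- ===== VERDICT (by name: the statement is the Claim_ definition above) =====
theorem solve_spec : Claim_equal_solve := by
  intro data _
  unfold Spec_solve solve solve_alt
  simp only [solve_eq_countP]
  symm
  have hfold :
      gen_target.foldl (fun total t =>
        total + (data.foldl (fun counts line =>
          line.foldl (fun counts word => counts.insert word (counts.getD word 0 + 1)) counts)
          (PySem.Dict.empty : PySem.Dict String Int)).getD t 0) 0
      = gen_target.foldl (fun total t => total + (((data.flatMap id).count t : Nat) : Int)) 0 := by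
    apply PySem.List.foldl_congr_mem
    intro acc t _
    rw [dict_getD]
    simp
  rw [hfold, sum_counts gen_target gen_target_nodup]
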